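-- pv_equiv track=rewrite | github.com/JiungChoi/PythonTutorial | data_practice.py | mask_security_number
-- ===== SOURCE A (Python) =====
-- def mask_security_number(security_number):
--     change_number = ''
--     count_num = 0
--     for number in security_number:
--         if '-' in security_number:
--             if count_num >= 10:
--                  change_number += '*'
--             else:
--                  change_number += number
--         else:
--             if count_num >= 9:
--                 change_number += '*'
--             else:
--                 change_number += number
--         count_num += 1
--     return change_number
-- ===== SOURCE B (Python) =====
-- def mask_security_number(security_number):
--     threshold = 10 if '-' in security_number else 9
--     return security_number[:threshold] + '*' * (len(security_number) - threshold)
-- ===== Notes on version B (the rewrite author's own statement) =====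
-- stated objective: simpler
-- what changed: Replaces the per-character loop (which re-runs the '-' membership scan every iteration) by a one-time threshold plus slice-and-repeat closed form.
import Mathlib
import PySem

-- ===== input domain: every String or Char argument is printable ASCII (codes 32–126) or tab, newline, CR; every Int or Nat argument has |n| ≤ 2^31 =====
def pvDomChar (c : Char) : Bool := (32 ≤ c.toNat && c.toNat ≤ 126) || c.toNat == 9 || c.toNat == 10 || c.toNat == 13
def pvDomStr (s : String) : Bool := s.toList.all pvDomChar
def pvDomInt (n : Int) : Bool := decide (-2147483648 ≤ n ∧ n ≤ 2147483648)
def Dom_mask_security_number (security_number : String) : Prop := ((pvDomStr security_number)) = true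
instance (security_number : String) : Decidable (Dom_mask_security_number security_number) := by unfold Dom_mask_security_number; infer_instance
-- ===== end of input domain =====

-- B replaces A's per-character loop (re-testing '-' membership each step) by a
-- one-time threshold plus a slice-and-repeat closed form; objective: simpler.

-- ===== PORT A =====
-- loop state: (change_number, count_num); the '-' membership test is re-evaluated
-- each iteration exactly as in A (it tests the whole string, a loop invariant)
def mask_security_number (security_number : String) : String :=
  let r := security_number.toList.foldl
    (fun (st : List Char × Int) number =>
      if '-' ∈ security_number.toList then
        if st.2 ≥ 10 then (st.1 ++ ['*'], st.2 + 1) else (st.1 ++ [number], st.2 + 1)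
      else
        if st.2 ≥ 9 then (st.1 ++ ['*'], st.2 + 1) else (st.1 ++ [number], st.2 + 1))
    ([], 0)
  String.ofList r.1

-- ===== PORT B =====
-- s[:t] with t ≥ 0 is List.take; '*' * (len - t) is '' for len ≤ t, matching Nat subtraction
def mask_security_number_alt (security_number : String) : String :=
  let threshold : Nat := if '-' ∈ security_number.toList then 10 else 9
  String.ofList (security_number.toList.take threshold
             ++ List.replicate (security_number.toList.length - threshold) '*')

-- ===== PRECONDITION & SPEC =====
def Spec_mask_security_number (security_number : String) (out : String) : Prop := out = mask_security_number_alt security_number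
instance (security_number : String) (out : String) : Decidable (Spec_mask_security_number security_number out) := by unfold Spec_mask_security_number; infer_instance

-- ===== CLAIM (what is proved, stated in full; the proofs are below) =====
def Claim_equal_mask_security_number : Prop := ∀ (security_number : String), Dom_mask_security_number security_number → Spec_mask_security_number security_number (mask_security_number security_number)

-- ===== LEMMAS AND PROOFS =====

-- A's loop with a fixed threshold t, started at count c, appends the first (t - c)
-- characters unchanged and stars for the rest.
theorem mask_loop_eq (t : Nat) (l : List Char) : ∀ (acc : List Char) (c : Nat),
    (l.foldl (fun (st : List Char × Int) number =>
        if st.2 ≥ (t : Int) then (st.1 ++ ['*'], st.2 + 1) else (st.1 ++ [number], st.2 + 1))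
      (acc, (c : Int))).1
    = acc ++ l.take (t - c) ++ List.replicate (l.length - (t - c)) '*' := by
  induction l with
  | nil => intro acc c; simp
  | cons x xs ih =>
    intro acc c
    by_cases h : t ≤ c
    · have hc : ((c : Int) ≥ (t : Int)) := by exact_mod_cast h
      have htc : t - c = 0 := Nat.sub_eq_zero_of_le h
      have htc1 : t - (c + 1) = 0 := Nat.sub_eq_zero_of_le (Nat.le_succ_of_le h)
      simp only [List.foldl_cons, if_pos hc]
      have := ih (acc ++ ['*']) (c + 1)
      push_cast at this
      rw [this, htc1, htc]
      simp [List.replicate_succ]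
    · have hc : ¬ ((c : Int) ≥ (t : Int)) := by
        simp only [ge_iff_le, not_le]; exact_mod_cast Nat.lt_of_not_le h
      have h1 : 1 ≤ t - c := by omega
      simp only [List.foldl_cons, if_neg hc]
      have := ih (acc ++ [x]) (c + 1)
      push_cast at this
      rw [this]
      have e1 : t - (c + 1) = (t - c) - 1 := by omega
      have e2 : (x :: xs).take (t - c) = x :: xs.take ((t - c) - 1) := by
        cases htc : t - c with
        | zero => omega
        | succ k => simp
      have e3 : (x :: xs).length - (t - c) = xs.length - ((t - c) - 1) := by
        simp only [List.length_cons]; omega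
      rw [e1, e2, e3]
      simp

-- ===== VERDICT (by name: the statement is the Claim_ definition above) =====
theorem mask_security_number_spec : Claim_equal_mask_security_number := by
  intro s _
  unfold Spec_mask_security_number mask_security_number mask_security_number_alt
  by_cases h : '-' ∈ s.toList
  · simp only [h, if_pos]
    have := mask_loop_eq 10 s.toList [] 0
    push_cast at this
    simp only [List.nil_append] at this
    rw [this]
  · simp only [h, ite_false]
    have := mask_loop_eq 9 s.toList [] 0
    push_cast at this
    simp only [List.nil_append] at this
    rw [this]
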